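-- pv_equiv track=rewrite | github.com/schlogl2017/BioinfoCourse | nuc_counter.py | get_palindromes
-- ===== SOURCE A (Python) =====
-- from collections import Counter
--
-- def count_kmers(sequence, k=1):
--     return Counter([sequence[i:i+k].upper() for i in range(0, len(sequence) - k + 1)])
--
-- def get_strand_complement(sequence):
--     """Returns the complement strand of the genome."""
--     change = str.maketrans('ACGT', 'TGCA')
--     return sequence.translate(change)
--
-- def get_reverse_complement(sequence):
--     """Returns the reverse complement strand of the genome."""
--     return get_strand_complement(sequence)[::-1]
--
-- def get_palindromes(sequence, k):
--     """Returns the count of all the palindromic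
--     substrings of a genome."""
--     kmers = list(count_kmers(sequence, k).keys())
--     rev_kmers = [get_reverse_complement(kmer) for kmer in kmers]
--     palindromes = []
--     for mer1, mer2 in zip(kmers, rev_kmers):
--         if mer1 == mer2:
--             palindromes.append((mer1, mer2))
--     return palindromes
-- ===== SOURCE B (Python) =====
-- def get_palindromes(sequence, k):
--     """Returns the count of all the palindromic
--     substrings of a genome."""
--     comp = {'A': 'T', 'T': 'A', 'C': 'G', 'G': 'C'}
--     palindromes = []
--     seen = set()
--     for i in range(len(sequence) - k + 1):
--         kmer = sequence[i:i + k].upper()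
--         if kmer in seen:
--             continue
--         seen.add(kmer)
--         m = len(kmer)
--         if all(comp.get(kmer[j], kmer[j]) == kmer[m - 1 - j] for j in range(m)):
--             palindromes.append((kmer, kmer))
--     return palindromes
-- ===== Notes on version B (the rewrite author's own statement) =====
-- stated objective: faster
-- what changed: Single pass with a seen-set replaces the Counter build plus reverse-complement list plus zip: each new k-mer is tested in place by comparing complementary character pairs, so no Counter, no reverse-complement strings and no intermediate lists are materialised.
import Mathlib
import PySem

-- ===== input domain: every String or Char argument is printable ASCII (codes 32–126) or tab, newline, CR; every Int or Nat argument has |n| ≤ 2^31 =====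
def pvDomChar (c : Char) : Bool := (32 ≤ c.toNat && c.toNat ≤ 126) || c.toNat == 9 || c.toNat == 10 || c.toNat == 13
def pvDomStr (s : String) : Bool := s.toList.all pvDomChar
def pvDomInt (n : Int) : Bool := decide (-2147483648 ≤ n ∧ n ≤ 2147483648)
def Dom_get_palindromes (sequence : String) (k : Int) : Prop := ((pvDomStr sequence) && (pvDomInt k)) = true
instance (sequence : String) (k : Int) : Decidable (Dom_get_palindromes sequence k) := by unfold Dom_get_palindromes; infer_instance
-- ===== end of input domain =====

-- B replaces the Counter / reverse-complement-list / zip pipeline by one pass with a seen-set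
-- that tests each new k-mer in place by comparing complementary character pairs in place (objective: faster; measured).

-- ===== PORT A =====
-- both Pythons contain the expression sequence[i:i+k].upper(); shared helper:
def pvKmer (sequence : String) (k i : Int) : String :=
  PySem.Str.upper (PySem.Str.slice sequence (some i) (some (i + k)))

-- str.maketrans('ACGT','TGCA') + translate, ported char-by-char (exact: translate maps each
-- listed code point through the table and leaves every other character unchanged)
def pvTrans (c : Char) : Char :=
  if c = 'A' then 'T' else if c = 'C' then 'G' else if c = 'G' then 'C' else if c = 'T' then 'A' else c

def count_kmers (sequence : String) (k : Int) : PySem.Dict String Int :=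
  PySem.Dict.counter
    ((PySem.List.pyRange 0 ((PySem.Str.len sequence : Int) - k + 1) 1).map (pvKmer sequence k))

def get_strand_complement (sequence : String) : String :=
  String.ofList (sequence.toList.map pvTrans)

-- sequence[::-1] is reversal (PySem.Str.slice?_none_none_neg_one)
def get_reverse_complement (sequence : String) : String :=
  String.ofList ((get_strand_complement sequence).toList.reverse)

def get_palindromes (sequence : String) (k : Int) : List (String × String) :=
  let kmers := (count_kmers sequence k).keys
  let rev_kmers := kmers.map get_reverse_complement
  (kmers.zip rev_kmers).foldl (fun pal p => if p.1 == p.2 then pal ++ [p] else pal) []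

-- ===== PORT B =====
def pvComp : PySem.Dict Char Char :=
  PySem.Dict.ofList [('A', 'T'), ('T', 'A'), ('C', 'G'), ('G', 'C')]

def get_palindromes_alt (sequence : String) (k : Int) : List (String × String) :=
  ((PySem.List.pyRange 0 ((PySem.Str.len sequence : Int) - k + 1) 1).foldl
    (fun st i =>
      let kmer := PySem.Str.upper (PySem.Str.slice sequence (some i) (some (i + k)))
      if PySem.Set.contains st.2 kmer then st
      else
        let seen := PySem.Set.add st.2 kmer
        let l := kmer.toList
        let m := l.length
        if (PySem.List.pyRange 0 (m : Int) 1).all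
            (fun j =>
              PySem.Dict.getD pvComp (PySem.List.pyGetD l j ' ') (PySem.List.pyGetD l j ' ')
                == PySem.List.pyGetD l ((m : Int) - 1 - j) ' ')
        then (st.1 ++ [(kmer, kmer)], seen)
        else (st.1, seen))
    ([], PySem.Set.empty)).1

-- ===== PRECONDITION & SPEC =====
def Spec_get_palindromes (sequence : String) (k : Int) (out : List (String × String)) : Prop := out = get_palindromes_alt sequence k
instance (sequence : String) (k : Int) (out : List (String × String)) : Decidable (Spec_get_palindromes sequence k out) := by unfold Spec_get_palindromes; infer_instance

-- ===== CLAIM (what is proved, stated in full; the proofs are below) =====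
def Claim_equal_get_palindromes : Prop := ∀ (sequence : String) (k : Int), Dom_get_palindromes sequence k → Spec_get_palindromes sequence k (get_palindromes sequence k)

-- ===== LEMMAS AND PROOFS =====

-- A's palindrome test and B's in-place pair test, as predicates
def pvPalA (s : String) : Bool := s == get_reverse_complement s

def pvPalB (s : String) : Bool :=
  (PySem.List.pyRange 0 (s.toList.length : Int) 1).all
    (fun j =>
      PySem.Dict.getD pvComp (PySem.List.pyGetD s.toList j ' ') (PySem.List.pyGetD s.toList j ' ')
        == PySem.List.pyGetD s.toList ((s.toList.length : Int) - 1 - j) ' ')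

-- B's loop body, with the k-mer abstracted out
def pvStep (st : List (String × String) × PySem.Set String) (x : String) :
    List (String × String) × PySem.Set String :=
  if PySem.Set.contains st.2 x then st
  else if pvPalB x then (st.1 ++ [(x, x)], PySem.Set.add st.2 x)
  else (st.1, PySem.Set.add st.2 x)

-- the fresh (first-occurrence) elements a seen-set loop lets through
def pvNews (seen : PySem.Set String) : List String → List String
  | [] => []
  | x :: xs =>
      if PySem.Set.contains seen x then pvNews seen xs
      else x :: pvNews (PySem.Set.add seen x) xs

theorem pvComp_getD (c : Char) : PySem.Dict.getD pvComp c c = pvTrans c := by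
  by_cases h1 : c = 'A'
  · subst h1; decide
  by_cases h2 : c = 'T'
  · subst h2; decide
  by_cases h3 : c = 'C'
  · subst h3; decide
  by_cases h4 : c = 'G'
  · subst h4; decide
  have e1 : ('A' == c) = false := by simp [Ne.symm h1]
  have e2 : ('T' == c) = false := by simp [Ne.symm h2]
  have e3 : ('C' == c) = false := by simp [Ne.symm h3]
  have e4 : ('G' == c) = false := by simp [Ne.symm h4]
  simp [pvComp, pvTrans, PySem.Dict.getD, PySem.Dict.get?, PySem.Dict.ofList,
    PySem.Dict.update, PySem.Dict.empty, PySem.Dict.insert, List.find?,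
    e1, e2, e3, e4, h1, h2, h3, h4]

-- a list equals the reverse of its complement iff complementary positions pair up
theorem pvCore (l : List Char) :
    l = (l.map pvTrans).reverse ↔
      ∀ j < l.length, pvTrans (l.getD j ' ') = l.getD (l.length - 1 - j) ' ' := by
  constructor
  · intro h j hj
    have hj' : l.length - 1 - j < l.length := by omega
    have := congrArg (fun t => t.getD (l.length - 1 - j) ' ') h
    simp only [List.getD_eq_getElem?_getD] at this ⊢
    rw [List.getElem?_reverse (by simpa using hj'), List.getElem?_map] at this
    have hidx : l.length - 1 - (l.length - 1 - j) = j := by omega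
    simp only [List.length_map, hidx] at this
    rw [List.getElem?_eq_getElem hj, List.getElem?_eq_getElem hj'] at this ⊢
    simp at this ⊢
    exact this.symm
  · intro h
    apply List.ext_getElem (by simp)
    intro i h1 h2
    rw [List.getElem_reverse, List.getElem_map]
    have hi : l.length - 1 - i < l.length := by omega
    have := h (l.length - 1 - i) hi
    have hidx : l.length - 1 - (l.length - 1 - i) = i := by omega
    rw [hidx] at this
    simp only [List.getD_eq_getElem?_getD, List.getElem?_eq_getElem hi, List.getElem?_eq_getElem h1] at this
    simp at this
    simp only [List.length_map]
    exact this.symm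

theorem pvPal_eq (s : String) : pvPalB s = pvPalA s := by
  rw [Bool.eq_iff_iff]
  unfold pvPalB pvPalA get_reverse_complement get_strand_complement
  rw [List.all_eq_true, beq_iff_eq]
  have hstr : (s = String.ofList ((String.ofList (s.toList.map pvTrans)).toList.reverse)) ↔
      s.toList = (s.toList.map pvTrans).reverse := by
    constructor
    · intro h; have := congrArg String.toList h; simpa using this
    · intro h
      apply String.ext
      simpa using h
  rw [hstr, pvCore]
  constructor
  · intro h j hj
    have hh := h (j : Int) (by rw [PySem.List.mem_pyRange_one]; omega)
    rw [beq_iff_eq, pvComp_getD] at hh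
    have e2 : ((s.toList.length : Int) - 1 - (j : Int)) = ((s.toList.length - 1 - j : Nat) : Int) := by omega
    rw [e2] at hh
    simpa [PySem.List.pyGetD_natCast] using hh
  · intro h j hj
    rw [PySem.List.mem_pyRange_one] at hj
    rw [beq_iff_eq, pvComp_getD]
    obtain ⟨jn, rfl⟩ : ∃ n : Nat, j = (n : Int) := ⟨j.toNat, by omega⟩
    have hjn : jn < s.toList.length := by omega
    have e2 : ((s.toList.length : Int) - 1 - (jn : Int)) = ((s.toList.length - 1 - jn : Nat) : Int) := by omega
    rw [e2]
    simpa [PySem.List.pyGetD_natCast] using h jn hjn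

theorem pvNews_update (xs : List String) : ∀ seen : PySem.Set String,
    seen ++ pvNews seen xs = PySem.Set.update seen xs := by
  induction xs with
  | nil => intro seen; simp [pvNews, PySem.Set.update]
  | cons x xs ih =>
    intro seen
    rw [PySem.Set.update_cons]
    by_cases hc : PySem.Set.contains seen x = true
    · have hadd : PySem.Set.add seen x = seen := by unfold PySem.Set.add; rw [if_pos hc]
      simp only [pvNews]
      rw [if_pos hc, ih seen, hadd]
    · have hadd : PySem.Set.add seen x = seen ++ [x] := by unfold PySem.Set.add; rw [if_neg hc]
      simp only [pvNews]
      rw [if_neg hc, ← ih (PySem.Set.add seen x), hadd]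
      simp

theorem pvNews_ofList (xs : List String) : pvNews PySem.Set.empty xs = PySem.Set.ofList xs := by
  have := pvNews_update xs PySem.Set.empty
  simpa [PySem.Set.empty, PySem.Set.update_nil_left] using this

theorem pvA_foldl (ks : List String) (f : String → String) :
    ∀ acc : List (String × String),
    (ks.zip (ks.map f)).foldl (fun pal p => if p.1 == p.2 then pal ++ [p] else pal) acc
      = acc ++ (ks.filter (fun m => m == f m)).map (fun m => (m, f m)) := by
  induction ks with
  | nil => intro acc; simp
  | cons x ks ih =>
    intro acc
    simp only [List.map_cons, List.zip_cons_cons, List.foldl_cons, List.filter_cons]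
    by_cases hx : (x == f x) = true
    · rw [if_pos hx, ih]
      simp [hx]
    · rw [if_neg hx, ih]
      simp [hx]

theorem pvB_foldl (xs : List String) :
    ∀ (acc : List (String × String)) (seen : PySem.Set String),
    (xs.foldl pvStep (acc, seen)).1
      = acc ++ ((pvNews seen xs).filter pvPalB).map (fun m => (m, m)) := by
  induction xs with
  | nil => intro acc seen; simp [pvNews]
  | cons x xs ih =>
    intro acc seen
    simp only [List.foldl_cons, pvNews]
    by_cases hc : PySem.Set.contains seen x = true
    · have hstep : pvStep (acc, seen) x = (acc, seen) := by unfold pvStep; rw [if_pos hc]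
      rw [hstep, if_pos hc]
      exact ih acc seen
    · by_cases hp : pvPalB x = true
      · have hstep : pvStep (acc, seen) x = (acc ++ [(x, x)], PySem.Set.add seen x) := by
          unfold pvStep; rw [if_neg hc, if_pos hp]
        rw [hstep, if_neg hc, ih (acc ++ [(x, x)]) (PySem.Set.add seen x)]
        simp [hp]
      · have hstep : pvStep (acc, seen) x = (acc, PySem.Set.add seen x) := by
          unfold pvStep; rw [if_neg hc, if_neg hp]
        rw [hstep, if_neg hc, ih acc (PySem.Set.add seen x)]
        simp [hp]

-- ===== VERDICT (by name: the statement is the Claim_ definition above) =====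
theorem get_palindromes_spec : Claim_equal_get_palindromes := by
  intro s k _
  unfold Spec_get_palindromes
  have hB : get_palindromes_alt s k
      = ((((PySem.List.pyRange 0 ((PySem.Str.len s : Int) - k + 1) 1).map (pvKmer s k)).foldl
          pvStep ([], PySem.Set.empty))).1 := by
    rw [List.foldl_map]
    rfl
  have hA : get_palindromes s k
      = (((count_kmers s k).keys).zip (((count_kmers s k).keys).map get_reverse_complement)).foldl
           (fun pal p => if p.1 == p.2 then pal ++ [p] else pal) [] := rfl
  rw [hA, hB, pvB_foldl, pvNews_ofList]
  simp only [count_kmers, PySem.Dict.keys_counter]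
  rw [pvA_foldl]
  simp only [List.nil_append]
  rw [List.filter_congr (fun m _ => pvPal_eq m)]
  apply List.map_congr_left
  intro m hm
  have := List.of_mem_filter hm
  unfold pvPalA at this
  rw [beq_iff_eq] at this
  rw [← this]
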